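-- pv_equiv track=rewrite | github.com/Ayustatus/thesis2023 | dataset/transformers/CSVTransformer.py | is_attack
-- ===== SOURCE A (Python) =====
-- def is_attack(src_ip,src_port,dest_ip,dest_port,timestamp,meta_object):
--     src = str.format("{0}:{1}",src_ip,src_port)
--     dest = str.format("{0}:{1}",dest_ip,dest_port)
--     if (src,dest) in meta_object:
--         durations = meta_object[(src,dest)]
--         for duration in durations:
--             if int(timestamp) >= int(duration[0]) and int(timestamp) <= int(duration[1]):
--                 return True
--     if (dest,src) in meta_object:
--         durations = meta_object[(dest,src)]
--         for duration in durations: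
--             if int(timestamp) >= int(duration[0]) and int(timestamp) <= int(duration[1]):
--                 return True
--     return False
-- ===== SOURCE B (Python) =====
-- def is_attack(src_ip, src_port, dest_ip, dest_port, timestamp, meta_object):
--     src = "{0}:{1}".format(src_ip, src_port)
--     dest = "{0}:{1}".format(dest_ip, dest_port)
--     t = int(timestamp)
--     # all spans for the pair, in either key order, sorted by start
--     ivs = sorted(meta_object.get((src, dest), []) + meta_object.get((dest, src), []),
--                  key=lambda iv: iv[0])
--     # prefix maxima of the span ends
--     max_ends = []
--     for iv in ivs:
--         max_ends.append(iv[1] if not max_ends else max(max_ends[-1], iv[1]))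
--     # binary search: lo ends as the number of spans whose start is <= t
--     lo, hi = 0, len(ivs)
--     while lo < hi:
--         mid = (lo + hi) // 2
--         if t < ivs[mid][0]:
--             hi = mid
--         else:
--             lo = mid + 1
--     # t lies in some span iff some span starting <= t ends >= t
--     return lo > 0 and max_ends[lo - 1] >= t
-- ===== Notes on version B (the rewrite author's own statement) =====
-- stated objective: alternative
-- what changed: B sorts the combined spans of the pair by start, builds prefix maxima of the ends, and decides containment with a binary search for the rightmost start <= t, instead of A's two membership-checked early-return linear scans.
import Mathlib
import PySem

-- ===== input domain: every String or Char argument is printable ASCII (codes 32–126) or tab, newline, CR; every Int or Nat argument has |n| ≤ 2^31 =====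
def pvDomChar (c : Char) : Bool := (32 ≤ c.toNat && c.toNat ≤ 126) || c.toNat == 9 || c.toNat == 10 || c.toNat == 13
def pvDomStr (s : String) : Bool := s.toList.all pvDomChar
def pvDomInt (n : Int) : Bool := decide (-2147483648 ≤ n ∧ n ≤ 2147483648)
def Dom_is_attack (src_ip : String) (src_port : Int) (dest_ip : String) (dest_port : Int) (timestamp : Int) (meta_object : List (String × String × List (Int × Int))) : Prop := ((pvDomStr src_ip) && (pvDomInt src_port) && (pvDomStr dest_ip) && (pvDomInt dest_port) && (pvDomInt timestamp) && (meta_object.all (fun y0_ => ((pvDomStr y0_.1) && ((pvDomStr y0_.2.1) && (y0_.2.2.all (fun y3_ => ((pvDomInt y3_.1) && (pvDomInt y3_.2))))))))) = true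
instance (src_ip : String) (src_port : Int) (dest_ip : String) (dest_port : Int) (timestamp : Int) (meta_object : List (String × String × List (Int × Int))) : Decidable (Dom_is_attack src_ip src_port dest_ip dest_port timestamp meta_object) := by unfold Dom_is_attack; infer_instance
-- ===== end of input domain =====

-- B replaces A's two membership-checked early-return linear scans by sort-by-start +
-- prefix maxima of ends + binary search for the rightmost start ≤ t (objective: alternative).

-- ===== PORT A =====
-- 'for duration in durations: if t >= lo and t <= hi: return True' (early-return loop)
def pvScanA (t : Int) : List (Int × Int) → Bool
  | [] => false
  | (lo, hi) :: rest => if t ≥ lo ∧ t ≤ hi then true else pvScanA t rest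

-- dict membership/index for the (String, String)-keyed dict (first match)
def pvLookupA (k1 k2 : String) : List (String × String × List (Int × Int)) → Option (List (Int × Int))
  | [] => none
  | (a, b, v) :: rest => if a = k1 ∧ b = k2 then some v else pvLookupA k1 k2 rest

def is_attack (src_ip : String) (src_port : Int) (dest_ip : String) (dest_port : Int) (timestamp : Int) (meta_object : List (String × String × List (Int × Int))) : Bool :=
  let src := src_ip ++ ":" ++ PySem.Int.toStr src_port
  let dest := dest_ip ++ ":" ++ PySem.Int.toStr dest_port
  let first :=
    match pvLookupA src dest meta_object with
    | some durations => pvScanA timestamp durations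
    | none => false
  if first then true else
    match pvLookupA dest src meta_object with
    | some durations => pvScanA timestamp durations
    | none => false

-- ===== PORT B =====
-- meta_object.get((k1,k2), []) via List.find? (first match)
def pvGetDB (k1 k2 : String) (mo : List (String × String × List (Int × Int))) : List (Int × Int) :=
  ((mo.find? (fun e => e.1 == k1 && e.2.1 == k2)).map (·.2.2)).getD []

-- 'max_ends.append(iv[1] if not max_ends else max(max_ends[-1], iv[1]))'
def pvPMStep (acc : List Int) (iv : Int × Int) : List Int :=
  acc ++ [match acc.getLast? with | none => iv.2 | some m => max m iv.2]

-- Source B's hand-written binary-search loop; ivs[mid] is ported with pyGetD: exact because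
-- lo ≤ mid < hi ≤ len(ivs) whenever it is read, so the default is never used
def pvBS (ivs : List (Int × Int)) (t : Int) (lo hi : Int) : Int :=
  if h : lo < hi then
    if t < (PySem.List.pyGetD ivs (PySem.Int.floordiv (lo + hi) 2) (0, 0)).1 then
      pvBS ivs t lo (PySem.Int.floordiv (lo + hi) 2)
    else
      pvBS ivs t (PySem.Int.floordiv (lo + hi) 2 + 1) hi
  else lo
termination_by (hi - lo).toNat
decreasing_by
  · have h2 : PySem.Int.floordiv (lo + hi) 2 < hi :=
      (PySem.Int.floordiv_lt_iff_lt_mul (by norm_num)).mpr (by omega)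
    omega
  · have h1 := PySem.Int.floordiv_two_mid_bounds (le_of_lt h)
    have h2 : PySem.Int.floordiv (lo + hi) 2 < hi :=
      (PySem.Int.floordiv_lt_iff_lt_mul (by norm_num)).mpr (by omega)
    omega

def is_attack_alt (src_ip : String) (src_port : Int) (dest_ip : String) (dest_port : Int) (timestamp : Int) (meta_object : List (String × String × List (Int × Int))) : Bool :=
  let src := src_ip ++ ":" ++ PySem.Int.toStr src_port
  let dest := dest_ip ++ ":" ++ PySem.Int.toStr dest_port
  let ivs := PySem.List.sorted (pvGetDB src dest meta_object ++ pvGetDB dest src meta_object) (·.1)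
  let maxEnds := ivs.foldl pvPMStep []
  let k := pvBS ivs timestamp 0 (ivs.length : Int)
  decide (0 < k) &&
    (match PySem.List.pyGet? maxEnds (k - 1) with
     | some m => decide (timestamp ≤ m)
     | none => false)

-- ===== PRECONDITION & SPEC =====
def Spec_is_attack (src_ip : String) (src_port : Int) (dest_ip : String) (dest_port : Int) (timestamp : Int) (meta_object : List (String × String × List (Int × Int))) (out : Bool) : Prop := out = is_attack_alt src_ip src_port dest_ip dest_port timestamp meta_object
instance (src_ip : String) (src_port : Int) (dest_ip : String) (dest_port : Int) (timestamp : Int) (meta_object : List (String × String × List (Int × Int))) (out : Bool) : Decidable (Spec_is_attack src_ip src_port dest_ip dest_port timestamp meta_object out) := by unfold Spec_is_attack; infer_instance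

-- ===== CLAIM (what is proved, stated in full; the proofs are below) =====
def Claim_equal_is_attack : Prop := ∀ (src_ip : String) (src_port : Int) (dest_ip : String) (dest_port : Int) (timestamp : Int) (meta_object : List (String × String × List (Int × Int))), Dom_is_attack src_ip src_port dest_ip dest_port timestamp meta_object → Spec_is_attack src_ip src_port dest_ip dest_port timestamp meta_object (is_attack src_ip src_port dest_ip dest_port timestamp meta_object)

-- ===== LEMMAS AND PROOFS =====

-- A-side: the early-return scan is an 'any'
theorem pvScanA_eq_any (t : Int) (l : List (Int × Int)) :
    pvScanA t l = l.any (fun p => decide (p.1 ≤ t) && decide (t ≤ p.2)) := by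
  induction l with
  | nil => rfl
  | cons hd tl ih =>
    obtain ⟨lo, hi⟩ := hd
    by_cases h1 : lo ≤ t <;> by_cases h2 : t ≤ hi <;> simp [pvScanA, ih, h1, h2]

-- A-side: A's membership + index = B's .get((k1,k2), [])
theorem pvLookupA_eq_getDB (k1 k2 : String) (mo : List (String × String × List (Int × Int))) :
    (match pvLookupA k1 k2 mo with
      | some v => v
      | none => ([] : List (Int × Int))) = pvGetDB k1 k2 mo := by
  induction mo with
  | nil => rfl
  | cons hd tl ih =>
    obtain ⟨a, b, v⟩ := hd
    by_cases h : a = k1 ∧ b = k2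
    · simp [pvLookupA, pvGetDB, List.find?, h.1, h.2]
    · have hb : (a == k1 && b == k2) = false := by
        rcases not_and_or.mp h with h' | h' <;> simp [h']
      simp only [pvLookupA, if_neg h, pvGetDB, List.find?_cons, hb] at *
      exact ih

-- A reduced to one 'any' over the combined spans
theorem is_attack_eq_any (src_ip : String) (src_port : Int) (dest_ip : String) (dest_port : Int) (timestamp : Int) (meta_object : List (String × String × List (Int × Int))) :
    is_attack src_ip src_port dest_ip dest_port timestamp meta_object
      = (pvGetDB (src_ip ++ ":" ++ PySem.Int.toStr src_port) (dest_ip ++ ":" ++ PySem.Int.toStr dest_port) meta_object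
          ++ pvGetDB (dest_ip ++ ":" ++ PySem.Int.toStr dest_port) (src_ip ++ ":" ++ PySem.Int.toStr src_port) meta_object).any
          (fun p => decide (p.1 ≤ timestamp) && decide (timestamp ≤ p.2)) := by
  unfold is_attack
  rw [List.any_append]
  rw [← pvLookupA_eq_getDB, ← pvLookupA_eq_getDB]
  cases h1 : pvLookupA (src_ip ++ ":" ++ PySem.Int.toStr src_port) (dest_ip ++ ":" ++ PySem.Int.toStr dest_port) meta_object <;>
    cases h2 : pvLookupA (dest_ip ++ ":" ++ PySem.Int.toStr dest_port) (src_ip ++ ":" ++ PySem.Int.toStr src_port) meta_object <;>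
    simp [h1, h2, pvScanA_eq_any]

-- binary-search invariant: the result k separates starts ≤ t from starts > t
theorem pvBS_inv (ivs : List (Int × Int)) (t : Int)
    (hp : ∀ i j (_ : i < ivs.length) (_ : j < ivs.length), i ≤ j → (ivs[i]'(by omega)).1 ≤ (ivs[j]'(by omega)).1) :
    ∀ d (lo hi : Nat), hi - lo ≤ d → lo ≤ hi → hi ≤ ivs.length →
    (∀ j (hj : j < ivs.length), j < lo → ivs[j].1 ≤ t) →
    (∀ j (hj : j < ivs.length), hi ≤ j → t < ivs[j].1) →
    ∃ k : Nat, pvBS ivs t (lo : Int) (hi : Int) = (k : Int) ∧ k ≤ ivs.length ∧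
      (∀ j (hj : j < ivs.length), j < k → ivs[j].1 ≤ t) ∧
      (∀ j (hj : j < ivs.length), k ≤ j → t < ivs[j].1) := by
  intro d
  induction d with
  | zero =>
    intro lo hi hd hle hlen hlo hhi
    have : lo = hi := by omega
    subst this
    rw [pvBS]
    simp only [lt_self_iff_false, dite_false]
    exact ⟨lo, rfl, by omega, hlo, hhi⟩
  | succ d ih =>
    intro lo hi hd hle hlen hlo hhi
    by_cases hlt : lo < hi
    · have hm : ((lo : Int) + (hi : Int)) = ((lo + hi : Nat) : Int) := by push_cast; ring
      have hmid : PySem.Int.floordiv ((lo : Int) + (hi : Int)) 2 = (((lo + hi) / 2 : Nat) : Int) := by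
        rw [hm]; exact_mod_cast PySem.Int.floordiv_natCast (lo + hi) 2
      set mid : Nat := (lo + hi) / 2 with hmiddef
      have hmlo : lo ≤ mid := by omega
      have hmhi : mid < hi := by omega
      have hmlen : mid < ivs.length := by omega
      rw [pvBS]
      have hcast : ((lo : Int) < (hi : Int)) := by exact_mod_cast hlt
      rw [dif_pos hcast, hmid, PySem.List.pyGetD_natCast, List.getD_eq_getElem _ _ hmlen]
      by_cases ht : t < (ivs[mid]'hmlen).1
      · rw [if_pos ht]
        exact ih lo mid (by omega) (by omega) (by omega) hlo
          (fun j hj hmj => lt_of_lt_of_le ht (hp mid j hmlen hj hmj))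
      · rw [if_neg ht]
        replace ht := not_lt.mp ht
        have : ((mid : Int) + 1) = ((mid + 1 : Nat) : Int) := by push_cast; ring
        rw [this]
        exact ih (mid + 1) hi (by omega) (by omega) hlen
          (fun j hj hjm => le_trans (hp j mid hj hmlen (by omega)) ht) hhi
    · have : lo = hi := by omega
      subst this
      rw [pvBS]
      simp only [lt_self_iff_false, dite_false]
      exact ⟨lo, rfl, by omega, hlo, hhi⟩

-- the prefix-maxima loop, one step unrolled into a pure carry recursion
def pvCarry (m : Int) : List (Int × Int) → List Int
  | [] => []
  | iv :: rest => max m iv.2 :: pvCarry (max m iv.2) rest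

theorem foldl_pvPMStep (l : List (Int × Int)) (acc : List Int) (m : Int) (h : acc.getLast? = some m) :
    l.foldl pvPMStep acc = acc ++ pvCarry m l := by
  induction l generalizing acc m with
  | nil => simp [pvCarry]
  | cons iv rest ih =>
    have hstep : pvPMStep acc iv = acc ++ [max m iv.2] := by simp [pvPMStep, h]
    rw [List.foldl_cons, hstep, ih _ (max m iv.2) List.getLast?_concat, pvCarry]
    simp

theorem maxEnds_eq (v : Int × Int) (rest : List (Int × Int)) :
    (v :: rest).foldl pvPMStep [] = v.2 :: pvCarry v.2 rest := by
  have h0 : pvPMStep [] v = [v.2] := by simp [pvPMStep]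
  rw [List.foldl_cons, h0, foldl_pvPMStep rest [v.2] v.2 (by rfl)]
  rfl

theorem pvCarry_length (m : Int) (l : List (Int × Int)) : (pvCarry m l).length = l.length := by
  induction l generalizing m with
  | nil => rfl
  | cons iv rest ih => simp [pvCarry, ih]

theorem pvCarry_getElem (l : List (Int × Int)) (m : Int) (i : Nat) (hi : i < l.length) :
    (pvCarry m l)[i]'(by rw [pvCarry_length]; exact hi)
      = ((l.take (i + 1)).map (·.2)).foldl max m := by
  induction l generalizing m i with
  | nil => simp at hi
  | cons iv rest ih =>
    cases i with
    | zero => simp [pvCarry]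
    | succ i =>
      have hi' : i < rest.length := by simpa using hi
      simpa [pvCarry] using ih (max m iv.2) i hi'

theorem maxEnds_getElem (v : Int × Int) (rest : List (Int × Int)) (i : Nat) (hi : i < rest.length + 1) :
    ((v :: rest).foldl pvPMStep [])[i]'(by
        rw [maxEnds_eq]; simpa [pvCarry_length] using hi)
      = ((rest.take i).map (·.2)).foldl max v.2 := by
  rw [List.getElem_of_eq (maxEnds_eq v rest)]
  cases i with
  | zero => simp
  | succ i =>
    have hi' : i < rest.length := by omega
    simpa using pvCarry_getElem rest v.2 i hi'

theorem le_foldl_max_iff (t m : Int) (L : List Int) :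
    t ≤ L.foldl max m ↔ t ≤ m ∨ ∃ y ∈ L, t ≤ y := by
  constructor
  · intro h
    rcases PySem.List.foldl_max_mem L m with h' | h'
    · left; rwa [h'] at h
    · right; exact ⟨L.foldl max m, h', h⟩
  · intro h
    rcases h with h | ⟨y, hy, hty⟩
    · exact le_trans h (PySem.List.le_foldl_max L m).1
    · exact le_trans hty ((PySem.List.le_foldl_max L m).2 y hy)

-- B-side core over an already start-sorted span list
theorem sorted_core (S : List (Int × Int)) (t : Int)
    (hpw : S.Pairwise (fun a b => a.1 ≤ b.1)) :
    (decide (0 < pvBS S t 0 (S.length : Int)) &&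
      (match PySem.List.pyGet? (S.foldl pvPMStep []) (pvBS S t 0 (S.length : Int) - 1) with
       | some m => decide (t ≤ m)
       | none => false))
      = S.any (fun p => decide (p.1 ≤ t) && decide (t ≤ p.2)) := by
  have hp : ∀ i j (hi : i < S.length) (hj : j < S.length), i ≤ j →
      (S[i]'(by omega)).1 ≤ (S[j]'(by omega)).1 := by
    intro i j hi hj hij
    rcases Nat.lt_or_eq_of_le hij with h | h
    · exact List.pairwise_iff_getElem.mp hpw i j hi hj h
    · subst h; exact le_refl _
  obtain ⟨k, hk, hkle, hklo, hkhi⟩ :=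
    pvBS_inv S t hp S.length 0 S.length (by omega) (by omega) (le_refl _)
      (fun j hj hj0 => absurd hj0 (by omega))
      (fun j hj hge => absurd hge (by omega))
  have hk0 : ((0 : Nat) : Int) = (0 : Int) := rfl
  rw [hk0] at hk
  rw [hk]
  cases S with
  | nil =>
    have : k = 0 := Nat.le_zero.mp (by simpa using hkle)
    subst this
    simp
  | cons v rest =>
    rw [Bool.eq_iff_iff]
    cases k with
    | zero =>
      simp only [Nat.cast_zero, lt_self_iff_false, decide_false, Bool.false_and, Bool.false_eq_true, false_iff]
      intro hany
      obtain ⟨p, hpmem, hpc⟩ := List.any_eq_true.mp hany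
      simp only [Bool.and_eq_true, decide_eq_true_eq] at hpc
      obtain ⟨j, hj, hpj⟩ := List.mem_iff_getElem.mp hpmem
      have := hkhi j hj (by omega)
      rw [hpj] at this
      omega
    | succ k' =>
      have hSlen : (v :: rest).length = rest.length + 1 := by simp
      have hk'len : k' < rest.length + 1 := by omega
      have hmelen : ((v :: rest).foldl pvPMStep []).length = rest.length + 1 := by
        rw [maxEnds_eq]; simp [pvCarry_length]
      have hidx : ((Nat.succ k' : Nat) : Int) - 1 = ((k' : Nat) : Int) := by push_cast; ring
      have hget : PySem.List.pyGet? ((v :: rest).foldl pvPMStep []) (((Nat.succ k' : Nat) : Int) - 1)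
          = some (((rest.take k').map (·.2)).foldl max v.2) := by
        rw [hidx, PySem.List.pyGet?_natCast, List.getElem?_eq_getElem (by omega),
          maxEnds_getElem v rest k' hk'len]
      rw [hget]
      have hpos : decide (0 < ((Nat.succ k' : Nat) : Int)) = true := by simp
      rw [hpos, Bool.true_and]
      rw [show (match (some (((rest.take k').map (·.2)).foldl max v.2) : Option Int) with
          | some m => decide (t ≤ m)
          | none => false) = decide (t ≤ ((rest.take k').map (·.2)).foldl max v.2) from rfl]
      rw [decide_eq_true_eq, le_foldl_max_iff, List.any_eq_true]
      constructor
      · intro h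
        rcases h with h | ⟨y, hy, hty⟩
        · refine ⟨v, List.mem_cons_self .., ?_⟩
          have h0 : ((v :: rest)[0]'(by simp)).1 ≤ t := hklo 0 (by simp) (by omega)
          simp only [List.getElem_cons_zero] at h0
          simp [h0, h]
        · obtain ⟨z, hz, hzy⟩ := List.mem_map.mp hy
          obtain ⟨j, hj, hjz⟩ := List.mem_take_iff_getElem.mp hz
          have hjr : j < rest.length := by omega
          refine ⟨rest[j], List.mem_cons_of_mem v (List.getElem_mem hjr), ?_⟩
          have h1 : ((v :: rest)[j+1]'(by simp; omega)).1 ≤ t :=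
            hklo (j+1) (by simp; omega) (by omega)
          simp only [List.getElem_cons_succ] at h1
          have h2 : t ≤ rest[j].2 := by rw [hjz, hzy]; exact hty
          simp [h1, h2]
      · intro ⟨p, hpmem, hpc⟩
        simp only [Bool.and_eq_true, decide_eq_true_eq] at hpc
        obtain ⟨j, hj, hpj⟩ := List.mem_iff_getElem.mp hpmem
        have hjk : j < k' + 1 := by
          by_contra hge
          have := hkhi j hj (by omega)
          rw [hpj] at this
          omega
        cases j with
        | zero =>
          left
          rw [← hpj] at hpc
          simpa using hpc.2
        | succ i =>
          right
          have hir : i < rest.length := by simpa using hj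
          refine ⟨rest[i].2, List.mem_map.mpr ⟨rest[i],
            List.mem_take_iff_getElem.mpr ⟨i, by omega, rfl⟩, rfl⟩, ?_⟩
          rw [← hpj] at hpc
          simpa using hpc.2

-- B-side characterization: B's core over any span list equals the plain 'any'
theorem alt_core_eq_any (L : List (Int × Int)) (t : Int) :
    (let ivs := PySem.List.sorted L (·.1);
     let maxEnds := ivs.foldl pvPMStep [];
     let k := pvBS ivs t 0 (ivs.length : Int);
     decide (0 < k) &&
       (match PySem.List.pyGet? maxEnds (k - 1) with
        | some m => decide (t ≤ m)
        | none => false))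
      = L.any (fun p => decide (p.1 ≤ t) && decide (t ≤ p.2)) := by
  simp only
  rw [sorted_core (PySem.List.sorted L (·.1)) t (PySem.List.sorted_pairwise L (·.1)),
    (PySem.List.sorted_perm L (·.1) false).any_eq]

-- ===== VERDICT (by name: the statement is the Claim_ definition above) =====
theorem is_attack_spec : Claim_equal_is_attack := by
  intro src_ip src_port dest_ip dest_port timestamp meta_object _
  unfold Spec_is_attack
  rw [is_attack_eq_any]
  unfold is_attack_alt
  exact (alt_core_eq_any _ timestamp).symm
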